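-- pv_equiv track=rewrite | github.com/jocho-here/coding-problems | python/maximal_rectangle.py | change_to_cumulative
-- ===== SOURCE A (Python) =====
-- def change_to_cumulative(rect):
--     new_rect = []
--
--     for r in range(len(rect)):
--         new_r = []
--         cumul = 0
--
--         for c in range(len(rect[r])-1, -1, -1):
--             curr = int(rect[r][c])
--
--             if curr == 1:
--                 cumul += curr
--             else:
--                 cumul = 0
--             new_r.insert(0, cumul)
--
--         new_rect.append(new_r)
--
--     return new_rect
-- ===== SOURCE B (Python) =====
-- def change_to_cumulative(rect):
--     # Run-length decomposition: scan each row left-to-right, split into maximal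
--     # runs of ones / non-ones, and emit [L, L-1, ..., 1] for a run of ones and
--     # [0]*L for a run of non-ones.
--     new_rect = []
--     for row in rect:
--         new_r = []
--         i = 0
--         n = len(row)
--         while i < n:
--             one = int(row[i]) == 1
--             j = i
--             while j < n and (int(row[j]) == 1) == one:
--                 j += 1
--             L = j - i
--             new_r.extend(range(L, 0, -1) if one else [0] * L)
--             i = j
--         new_rect.append(new_r)
--     return new_rect
-- ===== Notes on version B (the rewrite author's own statement) =====
-- stated objective: faster
-- what changed: Replaces the right-to-left per-cell accumulator with O(row) list.insert(0,..) front insertions by a left-to-right run-length decomposition that emits a descending segment [L..1] per run of ones and [0]*L per run of non-ones, appending at the end only.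
import Mathlib
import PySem

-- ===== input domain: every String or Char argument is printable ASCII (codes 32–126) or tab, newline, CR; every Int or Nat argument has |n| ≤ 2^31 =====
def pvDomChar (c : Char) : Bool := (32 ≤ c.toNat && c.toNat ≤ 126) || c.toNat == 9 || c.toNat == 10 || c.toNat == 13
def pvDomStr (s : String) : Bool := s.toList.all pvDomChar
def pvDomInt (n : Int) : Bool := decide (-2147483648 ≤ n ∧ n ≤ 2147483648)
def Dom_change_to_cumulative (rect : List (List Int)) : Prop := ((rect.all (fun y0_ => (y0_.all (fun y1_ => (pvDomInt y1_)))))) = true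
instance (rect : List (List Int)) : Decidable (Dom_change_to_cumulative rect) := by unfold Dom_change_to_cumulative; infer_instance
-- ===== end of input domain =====

-- B replaces A's right-to-left per-cell accumulator by a left-to-right
-- run-length decomposition (same values, different traversal / decomposition).

-- ===== PORT A =====
-- inner loop body: for c in range(len(row)-1,-1,-1): cumul update + new_r.insert(0, cumul)
def pvStepA (row : List Int) (p : List Int × Int) (c : Int) : List Int × Int :=
  let curr := PySem.List.pyGetD row c 0
  if curr == 1 then ((p.2 + curr) :: p.1, p.2 + curr) else ((0 : Int) :: p.1, 0)

def change_to_cumulative (rect : List (List Int)) : List (List Int) :=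
  (PySem.List.pyRange 0 (rect.length : Int) 1).foldl
    (fun new_rect r =>
      let row := PySem.List.pyGetD rect r []
      let st := (PySem.List.pyRange ((row.length : Int) - 1) (-1) (-1)).foldl (pvStepA row) ([], 0)
      new_rect ++ [st.1])
    []

-- ===== PORT B =====
-- length of the maximal prefix of xs whose elements satisfy (x == 1) = k (the inner while loop)
def pvRunLen (k : Bool) : List Int → Nat
  | [] => 0
  | x :: xs => if (x == 1) == k then pvRunLen k xs + 1 else 0

-- list(range(L, 0, -1)) = [L, L-1, ..., 1]
def pvDesc (L : Nat) : List Int := (List.range L).map (fun i => ((L - i : Nat) : Int))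

-- one row: peel a maximal run, emit its segment, recurse on the rest (Source B's outer while loop)
def pvCumulRow : List Int → List Int
  | [] => []
  | x :: xs =>
    let k := x == 1
    let L := pvRunLen k xs + 1
    (if k then pvDesc L else List.replicate L 0) ++ pvCumulRow (xs.drop (L - 1))
termination_by xs => xs.length
decreasing_by simp

def change_to_cumulative_alt (rect : List (List Int)) : List (List Int) :=
  rect.map pvCumulRow

-- ===== PRECONDITION & SPEC =====
def Spec_change_to_cumulative (rect : List (List Int)) (out : List (List Int)) : Prop := out = change_to_cumulative_alt rect
instance (rect : List (List Int)) (out : List (List Int)) : Decidable (Spec_change_to_cumulative rect out) := by unfold Spec_change_to_cumulative; infer_instance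

-- ===== CLAIM (what is proved, stated in full; the proofs are below) =====
def Claim_equal_change_to_cumulative : Prop := ∀ (rect : List (List Int)), Dom_change_to_cumulative rect → Spec_change_to_cumulative rect (change_to_cumulative rect)

-- ===== LEMMAS AND PROOFS =====

-- length of the maximal prefix of 1s of a row
def pvLead1 : List Int → Nat
  | [] => 0
  | x :: xs => if x = 1 then pvLead1 xs + 1 else 0

-- the common specification: position i holds the count of consecutive 1s starting at i
def pvG : List Int → List Int
  | [] => []
  | x :: xs => ((pvLead1 (x :: xs) : Nat) : Int) :: pvG xs

lemma foldr_eq_pvG (row : List Int) :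
    row.foldr (fun v (p : List Int × Int) =>
        if v == 1 then ((p.2 + v) :: p.1, p.2 + v) else ((0 : Int) :: p.1, 0)) ([], 0)
      = (pvG row, (pvLead1 row : Int)) := by
  induction row with
  | nil => simp [pvG, pvLead1]
  | cons x xs ih =>
    simp only [List.foldr_cons, ih, pvG, pvLead1]
    by_cases hx : x = 1 <;> simp [hx]

lemma rowA_eq_pvG (row : List Int) :
    ((PySem.List.pyRange ((row.length : Int) - 1) (-1) (-1)).foldl (pvStepA row) ([], 0)).1
      = pvG row := by
  have h1 : PySem.List.pyRange ((row.length : Int) - 1) (-1) (-1)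
      = (PySem.List.pyRange 0 (row.length : Int) 1).reverse := by
    rw [PySem.List.pyRange_neg_one_eq_reverse]; norm_num
  rw [h1, List.foldl_reverse]
  have h2 : (PySem.List.pyRange 0 (row.length : Int) 1).foldr
      (fun c p => pvStepA row p c) ([], 0)
      = ((PySem.List.pyRange 0 (row.length : Int) 1).map (fun c => PySem.List.pyGetD row c 0)).foldr
          (fun v (p : List Int × Int) =>
            if v == 1 then ((p.2 + v) :: p.1, p.2 + v) else ((0 : Int) :: p.1, 0)) ([], 0) := by
    rw [List.foldr_map]; rfl
  rw [h2, PySem.List.map_pyGetD_pyRange_zero', foldr_eq_pvG]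

lemma pvLead1_replicate_ones (L : Nat) (t : List Int) :
    pvLead1 (List.replicate L 1 ++ t) = L + pvLead1 t := by
  induction L with
  | zero => simp
  | succ n ih => simp [List.replicate_succ, pvLead1, ih]; omega

lemma pvG_ones (L : Nat) (t : List Int) (h : pvLead1 t = 0) :
    pvG (List.replicate L 1 ++ t) = pvDesc L ++ pvG t := by
  induction L with
  | zero => simp [pvDesc]
  | succ n ih =>
    rw [List.replicate_succ, List.cons_append]
    show ((pvLead1 ((1:Int) :: (List.replicate n 1 ++ t)) : Nat) : Int)
        :: pvG (List.replicate n 1 ++ t) = pvDesc (n+1) ++ pvG t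
    have hl : pvLead1 ((1:Int) :: (List.replicate n 1 ++ t)) = n + 1 := by
      simp [pvLead1, pvLead1_replicate_ones, h]
    rw [hl, ih]
    have hd : pvDesc (n+1) = ((n+1 : Nat) : Int) :: pvDesc n := by
      simp [pvDesc, List.range_succ_eq_map, List.map_map, Function.comp_def]
    rw [hd]; simp

lemma pvG_not_ones (pre t : List Int) (h : ∀ x ∈ pre, x ≠ 1) :
    pvG (pre ++ t) = List.replicate pre.length 0 ++ pvG t := by
  induction pre with
  | nil => simp
  | cons x xs ih =>
    rw [List.cons_append]
    show ((pvLead1 (x :: (xs ++ t)) : Nat) : Int) :: pvG (xs ++ t) = _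
    have hx : x ≠ 1 := h x (by simp)
    rw [ih (fun y hy => h y (by simp [hy]))]
    simp [pvLead1, hx, List.replicate_succ]

lemma pvRunLen_le (k : Bool) (xs : List Int) : pvRunLen k xs ≤ xs.length := by
  induction xs with
  | nil => simp [pvRunLen]
  | cons x xs ih => by_cases h : (x == 1) = k <;> simp [pvRunLen, h]; omega

lemma pvRunLen_take (k : Bool) (xs : List Int) :
    ∀ y ∈ xs.take (pvRunLen k xs), (y == 1) = k := by
  induction xs with
  | nil => simp [pvRunLen]
  | cons x xs ih =>
    by_cases h : (x == 1) = k
    · have hstep : pvRunLen k (x :: xs) = pvRunLen k xs + 1 := by simp [pvRunLen, h]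
      rw [hstep, List.take_succ_cons]
      intro y hy
      rcases List.mem_cons.mp hy with rfl | hy'
      · exact h
      · exact ih y hy'
    · have hstep : pvRunLen k (x :: xs) = 0 := by simp [pvRunLen, h]
      rw [hstep]; simp

lemma pvLead1_drop_runLen (xs : List Int) :
    pvLead1 (xs.drop (pvRunLen true xs)) = 0 := by
  induction xs with
  | nil => simp [pvRunLen, pvLead1]
  | cons x xs ih =>
    by_cases h : x = 1
    · simpa [pvRunLen, h] using ih
    · simp [pvRunLen, h, pvLead1]

lemma pvCumulRow_eq_pvG (row : List Int) : pvCumulRow row = pvG row := by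
  induction hn : row.length using Nat.strong_induction_on generalizing row with
  | _ n ih =>
  cases row with
  | nil => rw [pvCumulRow]; rfl
  | cons x xs =>
    rw [pvCumulRow]
    have hrl := pvRunLen_le (x == 1) xs
    have hrec : pvCumulRow (xs.drop (pvRunLen (x == 1) xs + 1 - 1))
        = pvG (xs.drop (pvRunLen (x == 1) xs)) := by
      simp only [Nat.add_sub_cancel]
      apply ih (xs.drop (pvRunLen (x == 1) xs)).length _ _ rfl
      simp only [List.length_drop, List.length_cons] at *
      omega
    rw [hrec]
    by_cases hx : x = 1
    · -- run of ones: x :: xs.take (runLen) is replicate (runLen+1) 1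
      have hkey : (x == 1) = true := by simp [hx]
      have hrep : x :: xs.take (pvRunLen (x == 1) xs)
          = List.replicate (pvRunLen (x == 1) xs + 1) 1 := by
        have hall : ∀ b ∈ x :: xs.take (pvRunLen (x == 1) xs), b = (1 : Int) := by
          intro b hb
          rcases List.mem_cons.mp hb with rfl | hmem
          · exact hx
          · have := pvRunLen_take (x == 1) xs b hmem
            rw [hkey] at this; simpa using this
        have hlen : (x :: xs.take (pvRunLen (x == 1) xs)).length
            = pvRunLen (x == 1) xs + 1 := by
          simp only [List.length_cons, List.length_take]; omega
        rw [← hlen]; exact List.eq_replicate_of_mem hall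
      have hl0 : pvLead1 (xs.drop (pvRunLen (x == 1) xs)) = 0 := by
        rw [hkey]; exact pvLead1_drop_runLen xs
      have hsplit : x :: xs = List.replicate (pvRunLen (x == 1) xs + 1) 1
          ++ xs.drop (pvRunLen (x == 1) xs) := by
        conv_lhs => rw [← List.take_append_drop (pvRunLen (x == 1) xs) xs]
        rw [← List.cons_append, hrep]
      conv_rhs => rw [hsplit]
      rw [pvG_ones _ _ hl0, hkey]
      simp
    · -- run of non-ones
      have hkey : (x == 1) = false := by simp [hx]
      have hne : ∀ y ∈ x :: xs.take (pvRunLen (x == 1) xs), y ≠ (1 : Int) := by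
        intro y hy
        rcases List.mem_cons.mp hy with rfl | hmem
        · exact hx
        · have := pvRunLen_take (x == 1) xs y hmem
          rw [hkey] at this; simpa using this
      have hsplit : x :: xs = (x :: xs.take (pvRunLen (x == 1) xs))
          ++ xs.drop (pvRunLen (x == 1) xs) := by
        conv_lhs => rw [← List.take_append_drop (pvRunLen (x == 1) xs) xs]
        rw [List.cons_append]
      have hlen : (x :: xs.take (pvRunLen (x == 1) xs)).length
          = pvRunLen (x == 1) xs + 1 := by
        simp only [List.length_cons, List.length_take]; omega
      conv_rhs => rw [hsplit]
      rw [pvG_not_ones _ _ hne, hlen, hkey]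
      simp

-- ===== VERDICT (by name: the statement is the Claim_ definition above) =====
theorem change_to_cumulative_spec : Claim_equal_change_to_cumulative := by
  intro rect _
  unfold Spec_change_to_cumulative change_to_cumulative change_to_cumulative_alt
  rw [PySem.List.foldl_pyRange_zero_pyGetD' rect []
      (fun new_rect row =>
        new_rect ++ [((PySem.List.pyRange ((row.length : Int) - 1) (-1) (-1)).foldl (pvStepA row) ([], 0)).1]) []]
  rw [PySem.List.foldl_append_singleton_eq_map]
  apply List.map_congr_left
  intro row _
  rw [rowA_eq_pvG, pvCumulRow_eq_pvG]
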